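-- pv_equiv track=rewrite | github.com/IssacWong2025/hkpos-competitive-analysis | scripts/run_all.py | pick_best_facebook_url
-- ===== SOURCE A (Python) =====
-- from typing import Dict, List, Sequence, Tuple
--
-- def pick_best_facebook_url(urls:List[str])->str:
--     cleaned=[]
--     for u in urls:
--         lu=u.lower()
--         if any(x in lu for x in ["/ads/library","/sharer","/share.php","/plugins/","/dialog/","/2008/fbml"]):
--             continue
--         cleaned.append(u.rstrip("/"))
--     if not cleaned:
--         return ""
--     # Prefer explicit page slugs over generic profile.php links.
--     cleaned.sort(key=lambda x: (("profile.php" in x.lower()), len(x)))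
--     return cleaned[0]
-- ===== SOURCE B (Python) =====
-- _JUNK = ("/ads/library", "/sharer", "/share.php", "/plugins/", "/dialog/", "/2008/fbml")
--
-- def pick_best_facebook_url(urls):
--     cleaned = [u.rstrip("/") for u in urls
--                if not any(x in u.lower() for x in _JUNK)]
--     if not cleaned:
--         return ""
--     non_profile = [c for c in cleaned if "profile.php" not in c.lower()]
--     pool = non_profile if non_profile else cleaned
--     return min(pool, key=len)
-- ===== Notes on version B (the rewrite author's own statement) =====
-- stated objective: simpler
-- what changed: Replaces A's two-level composite-key sort (profile-flag, length) of the whole cleaned list by an explicit partition into non-profile URLs with fallback plus a single min-by-length selection, so no sort is performed.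
import Mathlib
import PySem

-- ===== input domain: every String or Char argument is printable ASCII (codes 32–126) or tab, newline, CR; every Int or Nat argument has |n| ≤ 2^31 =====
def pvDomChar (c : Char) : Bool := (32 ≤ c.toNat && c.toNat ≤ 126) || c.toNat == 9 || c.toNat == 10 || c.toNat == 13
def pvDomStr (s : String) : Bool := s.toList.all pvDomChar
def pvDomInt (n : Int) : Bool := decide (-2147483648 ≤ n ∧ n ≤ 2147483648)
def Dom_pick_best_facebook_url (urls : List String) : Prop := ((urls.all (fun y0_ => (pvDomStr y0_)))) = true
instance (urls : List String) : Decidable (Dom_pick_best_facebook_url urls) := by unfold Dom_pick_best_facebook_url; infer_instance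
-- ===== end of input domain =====

-- B replaces A's two-level composite-key sort by an explicit partition (non-profile first) plus a
-- single shortest-length min with a fallback: simpler selection, no sort.

-- ===== PORT A =====
-- shared with B (same helper expressions appear in both Pythons)
-- exact port of u.rstrip("/"): drop every trailing '/' character
def pvRstripSlash (u : String) : String :=
  String.ofList ((u.toList.reverse.dropWhile (fun c => c == '/')).reverse)

def pvJunk : List String := ["/ads/library", "/sharer", "/share.php", "/plugins/", "/dialog/", "/2008/fbml"]

def pvIsJunk (u : String) : Bool := pvJunk.any (fun x => PySem.Str.isIn x (PySem.Str.lower u))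

def pvIsProfile (c : String) : Bool := PySem.Str.isIn "profile.php" (PySem.Str.lower c)

def pick_best_facebook_url (urls : List String) : String :=
  let cleaned := urls.foldl (fun acc u => if pvIsJunk u then acc else acc ++ [pvRstripSlash u]) []
  if cleaned = [] then ""
  else
    -- sort key (("profile.php" in x.lower()), len(x)): the bool component ported as 0/1 (False < True)
    let s := PySem.List.sorted2 cleaned (fun x => if pvIsProfile x then (1 : Nat) else 0)
               (fun x => PySem.Str.len x)
    (PySem.List.pyGet? s 0).getD ""

-- ===== PORT B =====
def pick_best_facebook_url_alt (urls : List String) : String :=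
  let cleaned := (urls.filter (fun u => !pvIsJunk u)).map pvRstripSlash
  if cleaned = [] then ""
  else
    let non_profile := cleaned.filter (fun c => !pvIsProfile c)
    let pool := if non_profile = [] then cleaned else non_profile
    (PySem.List.min? pool (fun x => PySem.Str.len x)).getD ""

-- ===== PRECONDITION & SPEC =====
def Spec_pick_best_facebook_url (urls : List String) (out : String) : Prop := out = pick_best_facebook_url_alt urls
instance (urls : List String) (out : String) : Decidable (Spec_pick_best_facebook_url urls out) := by unfold Spec_pick_best_facebook_url; infer_instance

-- ===== CLAIM (what is proved, stated in full; the proofs are below) =====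
def Claim_equal_pick_best_facebook_url : Prop := ∀ (urls : List String), Dom_pick_best_facebook_url urls → Spec_pick_best_facebook_url urls (pick_best_facebook_url urls)

-- ===== LEMMAS AND PROOFS =====

-- the comparison sorted2 uses, beta-reduced (Python: key tuple < key tuple)
def pvLt (a b : String) : Bool :=
  decide ((if pvIsProfile a then (1 : Nat) else 0) < (if pvIsProfile b then (1 : Nat) else 0)) ||
    (!decide ((if pvIsProfile b then (1 : Nat) else 0) < (if pvIsProfile a then (1 : Nat) else 0)) &&
      decide (PySem.Str.len a < PySem.Str.len b))

-- running "first minimum" of the two selections, on a plain accumulator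
def pvStepA (m x : String) : String := if pvLt x m then x else m
def pvStepB (m x : String) : String := if PySem.Str.len x < PySem.Str.len m then x else m

theorem pvInsertBy_unfold (b : String → String → Bool) (x : String) (acc : List String) :
    PySem.List.insertBy b x acc =
      match acc with
      | [] => [x]
      | y :: ys => if b x y then x :: y :: ys else y :: PySem.List.insertBy b x ys := by
  cases acc <;> rfl

theorem pvHead?_insertBy (b : String → String → Bool) (x : String) (acc : List String) :
    (PySem.List.insertBy b x acc).head? =
      some (match acc.head? with | none => x | some m => if b x m then x else m) := by
  cases acc with
  | nil => rfl
  | cons m t =>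
    rw [pvInsertBy_unfold]
    by_cases h : b x m = true <;> simp [h]

theorem pvHead?_foldl_insertBy (b : String → String → Bool) (xs : List String) (acc : List String) :
    (xs.foldl (fun acc x => PySem.List.insertBy b x acc) acc).head? =
      xs.foldl (fun o x => some (match o with | none => x | some m => if b x m then x else m)) acc.head? := by
  induction xs generalizing acc with
  | nil => rfl
  | cons x xs ih =>
    simp only [List.foldl_cons]
    rw [ih, pvHead?_insertBy]

theorem pvFoldA_some (xs : List String) (m : String) :
    xs.foldl (fun o x => some (match o with | none => x | some m => if pvLt x m then x else m)) (some m)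
      = some (xs.foldl pvStepA m) := by
  induction xs generalizing m with
  | nil => rfl
  | cons x xs ih => simp only [List.foldl_cons]; exact ih _

-- comparison facts
theorem pvLt_ff (x m : String) (hx : pvIsProfile x = true) (hm : pvIsProfile m = false) :
    pvLt x m = false := by simp [pvLt, hx, hm]

theorem pvLt_tt (x m : String) (hx : pvIsProfile x = false) (hm : pvIsProfile m = true) :
    pvLt x m = true := by simp [pvLt, hx, hm]

theorem pvLt_same (x m : String) (h : pvIsProfile x = pvIsProfile m) :
    pvLt x m = decide (PySem.Str.len x < PySem.Str.len m) := by
  cases hx : pvIsProfile x <;> rw [hx] at h <;> simp [pvLt, hx, ← h]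

theorem pvStepA_of_same (m x : String) (h : pvIsProfile x = pvIsProfile m) :
    pvStepA m x = pvStepB m x := by
  simp only [pvStepA, pvStepB, pvLt_same x m h]
  split <;> simp_all

-- (a) accumulator is non-profile: profile elements are ignored, the rest is a plain length-min
theorem pvFold_nonprofile (xs : List String) (m : String) (hm : pvIsProfile m = false) :
    xs.foldl pvStepA m = (xs.filter (fun c => !pvIsProfile c)).foldl pvStepB m := by
  induction xs generalizing m with
  | nil => rfl
  | cons x xs ih =>
    simp only [List.foldl_cons, List.filter_cons]
    cases hx : pvIsProfile x with
    | true =>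
      simp only [Bool.not_true]
      rw [show pvStepA m x = m from by simp [pvStepA, pvLt_ff x m hx hm]]
      exact ih m hm
    | false =>
      simp only [Bool.not_false]
      rw [pvStepA_of_same m x (by rw [hx, hm])]
      refine ih _ ?_
      simp only [pvStepB]; split <;> simp [hx, hm]

-- (b) everything (accumulator included) is profile: still a plain length-min
theorem pvFold_allprofile (xs : List String) (m : String) (hm : pvIsProfile m = true)
    (h : ∀ x ∈ xs, pvIsProfile x = true) :
    xs.foldl pvStepA m = xs.foldl pvStepB m := by
  induction xs generalizing m with
  | nil => rfl
  | cons x xs ih =>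
    simp only [List.foldl_cons]
    rw [pvStepA_of_same m x (by rw [h x (by simp), hm])]
    refine ih _ ?_ (fun y hy => h y (by simp [hy]))
    simp only [pvStepB]; split <;> simp [h x (by simp), hm]

-- (c) profile accumulator, some non-profile element ahead: the first one resets the minimum
theorem pvFold_mixed (xs : List String) (m : String) (hm : pvIsProfile m = true)
    (y : String) (ys : List String) (hf : xs.filter (fun c => !pvIsProfile c) = y :: ys) :
    xs.foldl pvStepA m = ys.foldl pvStepB y := by
  induction xs generalizing m with
  | nil => simp at hf
  | cons x xs ih =>
    simp only [List.filter_cons] at hf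
    cases hx : pvIsProfile x with
    | true =>
      simp only [hx, Bool.not_true] at hf
      simp only [List.foldl_cons]
      rw [pvStepA_of_same m x (by rw [hx, hm])]
      refine ih _ ?_ hf
      simp only [pvStepB]; split <;> simp [hx, hm]
    | false =>
      simp only [hx, Bool.not_false, if_pos] at hf
      obtain ⟨rfl, rfl⟩ : x = y ∧ xs.filter (fun c => !pvIsProfile c) = ys := by
        constructor <;> [exact (List.cons.injEq .. ▸ hf).1; exact (List.cons.injEq .. ▸ hf).2]
      simp only [List.foldl_cons]
      rw [show pvStepA m x = x from by simp [pvStepA, pvLt_tt x m hx hm]]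
      exact pvFold_nonprofile xs x hx

-- A's cleaned-building loop is B's filter+map comprehension
theorem pvCleaned_eq (urls : List String) :
    urls.foldl (fun acc u => if pvIsJunk u then acc else acc ++ [pvRstripSlash u]) []
      = (urls.filter (fun u => !pvIsJunk u)).map pvRstripSlash := by
  rw [show (fun (acc : List String) u => if pvIsJunk u then acc else acc ++ [pvRstripSlash u])
        = (fun acc u => if !pvIsJunk u then acc ++ [pvRstripSlash u] else acc) from by
      funext acc u; cases pvIsJunk u <;> rfl]
  simpa using PySem.List.foldl_append_if (fun u => !pvIsJunk u) pvRstripSlash urls []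

-- head of A's sort = first minimum under pvLt
theorem pvHead_sorted (c : String) (rest : List String) :
    (PySem.List.sorted2 (c :: rest) (fun x => if pvIsProfile x then (1 : Nat) else 0)
        (fun x => PySem.Str.len x)).head? = some (rest.foldl pvStepA c) := by
  have h : PySem.List.sorted2 (c :: rest) (fun x => if pvIsProfile x then (1 : Nat) else 0)
      (fun x => PySem.Str.len x)
      = (c :: rest).foldl (fun acc x => PySem.List.insertBy pvLt x acc) [] := rfl
  rw [h, pvHead?_foldl_insertBy]
  simp only [List.foldl_cons, List.head?_nil]
  exact pvFoldA_some rest c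

-- B's min = first minimum under length
theorem pvMin_eq (rest : List String) (c : String) :
    PySem.List.min? (c :: rest) (fun x => PySem.Str.len x) = some (rest.foldl pvStepB c) := by
  induction rest generalizing c with
  | nil => rfl
  | cons x xs ih =>
    have h : (if PySem.Str.len x < PySem.Str.len c then some x else some c) = some (pvStepB c x) := by
      simp only [pvStepB]; split <;> rfl
    calc PySem.List.min? (c :: x :: xs) (fun s => PySem.Str.len s)
        = PySem.List.min? (pvStepB c x :: xs) (fun s => PySem.Str.len s) := by
          unfold PySem.List.min?
          simp only [List.foldl_cons]
          rw [h]
      _ = some (xs.foldl pvStepB (pvStepB c x)) := ih _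
      _ = some ((x :: xs).foldl pvStepB c) := by rw [List.foldl_cons]

theorem pvPyGet?_zero (xs : List String) : PySem.List.pyGet? xs 0 = xs.head? := by
  cases xs <;> simp [PySem.List.pyGet?, PySem.List.pyIdx?]

theorem pvMain (urls : List String) :
    pick_best_facebook_url urls = pick_best_facebook_url_alt urls := by
  unfold pick_best_facebook_url pick_best_facebook_url_alt
  simp only [pvCleaned_eq]
  cases hc : (urls.filter (fun u => !pvIsJunk u)).map pvRstripSlash with
  | nil => simp
  | cons c rest =>
    have hA : (PySem.List.pyGet? (PySem.List.sorted2 (c :: rest)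
        (fun x => if pvIsProfile x then (1 : Nat) else 0) (fun x => PySem.Str.len x)) 0).getD ""
        = rest.foldl pvStepA c := by
      rw [pvPyGet?_zero, pvHead_sorted]; rfl
    rw [hA]
    cases hf : (c :: rest).filter (fun x => !pvIsProfile x) with
    | nil =>
      have hall : ∀ x ∈ rest, pvIsProfile x = true := by
        intro x hx
        by_contra h
        have hm : x ∈ (c :: rest).filter (fun x => !pvIsProfile x) :=
          List.mem_filter.mpr ⟨by simp [hx], by simp [h]⟩
        rw [hf] at hm; simp at hm
      have hcp : pvIsProfile c = true := by
        by_contra h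
        have hm : c ∈ (c :: rest).filter (fun x => !pvIsProfile x) :=
          List.mem_filter.mpr ⟨by simp, by simp [h]⟩
        rw [hf] at hm; simp at hm
      rw [if_pos rfl, pvMin_eq, Option.getD_some]
      exact pvFold_allprofile rest c hcp hall
    | cons y ys =>
      rw [if_neg (List.cons_ne_nil y ys), pvMin_eq, Option.getD_some]
      simp only [List.filter_cons] at hf
      cases hcp : pvIsProfile c with
      | false =>
        simp only [hcp, Bool.not_false, if_pos] at hf
        have hcy : c = y := (List.cons.injEq .. ▸ hf).1
        have hrest : rest.filter (fun x => !pvIsProfile x) = ys := (List.cons.injEq .. ▸ hf).2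
        subst hcy
        rw [← hrest]
        exact pvFold_nonprofile rest c hcp
      | true =>
        simp only [hcp, Bool.not_true] at hf
        exact pvFold_mixed rest c hcp y ys hf

-- ===== VERDICT (by name: the statement is the Claim_ definition above) =====
theorem pick_best_facebook_url_spec : Claim_equal_pick_best_facebook_url := by
  intro urls _
  unfold Spec_pick_best_facebook_url
  exact pvMain urls
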